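-- pv_equiv track=rewrite | github.com/esredson/designacoes | src/util.py | calcular_qtd_erros_distribuicao
-- ===== SOURCE A (Python) =====
-- def find_last(str, array, end_index):
--     for i in range(end_index, -1, -1):
--         if array[i] == str:
--             return i
--     return -1
--
-- def calcular_qtd_erros_distribuicao(array, valores_referencia):
--     qtd_vals_referencia = len(valores_referencia)
--     qtd_repeticoes = 0
--     for i, val in enumerate(array):
--         posicao_anterior = find_last(val, array, end_index=i-1)
--         if (posicao_anterior > -1 and (i - posicao_anterior) < qtd_vals_referencia):
--             qtd_repeticoes+=1
--     return qtd_repeticoes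
-- ===== SOURCE B (Python) =====
-- def calcular_qtd_erros_distribuicao(array, valores_referencia):
--     k = len(valores_referencia)
--     if k < 2:
--         return 0  # a repeat needs a gap of at least 1, impossible when the window is < 2
--     window = {}  # multiset (value -> count) of the k-1 elements preceding the current one
--     qtd = 0
--     for i, val in enumerate(array):
--         if window.get(val, 0) > 0:
--             qtd += 1
--         window[val] = window.get(val, 0) + 1
--         j = i - k + 1
--         if j >= 0:
--             window[array[j]] -= 1
--     return qtd
-- ===== Notes on version B (the rewrite author's own statement) =====
-- stated objective: faster
-- what changed: Instead of scanning backwards for each element's previous occurrence, B maintains a sliding-window multiset (value->count dict with eviction) of the k-1 preceding elements and tests membership in it, turning the O(n*k) nested scan into one O(n) pass.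
import Mathlib
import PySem

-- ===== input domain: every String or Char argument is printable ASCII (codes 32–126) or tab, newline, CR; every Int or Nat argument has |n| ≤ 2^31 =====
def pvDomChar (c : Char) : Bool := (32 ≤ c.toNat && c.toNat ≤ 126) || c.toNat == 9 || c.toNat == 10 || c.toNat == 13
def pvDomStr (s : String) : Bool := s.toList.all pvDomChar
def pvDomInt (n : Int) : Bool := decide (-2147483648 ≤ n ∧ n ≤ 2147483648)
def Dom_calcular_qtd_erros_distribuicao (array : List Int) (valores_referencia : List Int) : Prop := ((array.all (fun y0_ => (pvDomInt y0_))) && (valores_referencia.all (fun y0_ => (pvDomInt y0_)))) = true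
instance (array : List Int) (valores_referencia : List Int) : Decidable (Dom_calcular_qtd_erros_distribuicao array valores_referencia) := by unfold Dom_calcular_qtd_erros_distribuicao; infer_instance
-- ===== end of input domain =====

-- B replaces A's per-element backward scan with one pass maintaining a sliding-window multiset
-- (value -> count dict with eviction) of the k-1 preceding elements; asymptotically faster, same count proved.


-- ===== PORT A =====
-- the 'for i in range(end_index, -1, -1)' loop of find_last, over the materialised range list
def find_last_loop (s : Int) (array : List Int) : List Int → Int
  | [] => -1
  | i :: rest => if PySem.List.pyGet? array i = some s then i else find_last_loop s array rest

def find_last (s : Int) (array : List Int) (end_index : Int) : Int :=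
  find_last_loop s array (PySem.List.pyRange end_index (-1) (-1))

-- the body of A's 'for i, val in enumerate(array)' loop
def stepA (array : List Int) (qtd_vals_referencia : Int) (qtd : Int) (p : Int × Int) : Int :=
  let posicao_anterior := find_last p.2 array (p.1 - 1)
  if posicao_anterior > -1 ∧ p.1 - posicao_anterior < qtd_vals_referencia then qtd + 1 else qtd

def calcular_qtd_erros_distribuicao (array : List Int) (valores_referencia : List Int) : Int :=
  let qtd_vals_referencia : Int := valores_referencia.length
  (PySem.List.enumerate array).foldl (stepA array qtd_vals_referencia) 0

-- ===== PORT B =====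
-- the body of B's loop: state = (window multiset as value->count dict, count).
-- Python's window.get(val, 0) is Dict.getD; 'window[array[j]] -= 1' reads array[j] with
-- 0 ≤ j ≤ i-1 < len(array), so pyGetD with any default is exact there, and the key is
-- always present (inserted at step j), so getD _ 0 - 1 is exact for the KeyError-free read.
def stepB (array : List Int) (k : Int) (st : PySem.Dict Int Int × Int) (p : Int × Int) : PySem.Dict Int Int × Int :=
  let qtd := if st.1.getD p.2 0 > 0 then st.2 + 1 else st.2
  let w := st.1.insert p.2 (st.1.getD p.2 0 + 1)
  let j := p.1 - k + 1
  if 0 ≤ j then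
    let x := PySem.List.pyGetD array j 0
    (w.insert x (w.getD x 0 - 1), qtd)
  else (w, qtd)

def calcular_qtd_erros_distribuicao_alt (array : List Int) (valores_referencia : List Int) : Int :=
  let k : Int := valores_referencia.length
  if k < 2 then 0
  else ((PySem.List.enumerate array).foldl (stepB array k) (PySem.Dict.empty, 0)).2

-- ===== PRECONDITION & SPEC =====
def Spec_calcular_qtd_erros_distribuicao (array : List Int) (valores_referencia : List Int) (out : Int) : Prop := out = calcular_qtd_erros_distribuicao_alt array valores_referencia
instance (array : List Int) (valores_referencia : List Int) (out : Int) : Decidable (Spec_calcular_qtd_erros_distribuicao array valores_referencia out) := by unfold Spec_calcular_qtd_erros_distribuicao; infer_instance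

-- ===== CLAIM (what is proved, stated in full; the proofs are below) =====
def Claim_equal_calcular_qtd_erros_distribuicao : Prop := ∀ (array : List Int) (valores_referencia : List Int), Dom_calcular_qtd_erros_distribuicao array valores_referencia → Spec_calcular_qtd_erros_distribuicao array valores_referencia (calcular_qtd_erros_distribuicao array valores_referencia)

-- ===== LEMMAS AND PROOFS =====

-- find_last_loop returns -1 or a member of the scanned index list
theorem find_last_loop_mem (s : Int) (array : List Int) :
    ∀ l : List Int, find_last_loop s array l = -1 ∨ find_last_loop s array l ∈ l := by
  intro l
  induction l with
  | nil => left; rfl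
  | cons i rest ih =>
    by_cases h : PySem.List.pyGet? array i = some s
    · right; simp [find_last_loop, h]
    · rcases ih with h1 | h1
      · left; simpa [find_last_loop, h] using h1
      · right; simp [find_last_loop, h]; right; exact h1

-- A's find_last result with end_index e is ≤ e (or -1)
theorem find_last_le (s : Int) (array : List Int) (e : Int) :
    find_last s array e = -1 ∨ (-1 < find_last s array e ∧ find_last s array e ≤ e) := by
  rcases find_last_loop_mem s array (PySem.List.pyRange e (-1) (-1)) with h | h
  · left; exact h
  · right; exact (PySem.List.mem_pyRange_neg_one).1 h

-- one backward-scan step peeled off at the top index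
theorem find_last_step (pre rest : List Int) (x v : Int) :
    find_last v (pre ++ x :: rest) (pre.length : Int)
      = if x = v then (pre.length : Int) else find_last v (pre ++ x :: rest) ((pre.length : Int) - 1) := by
  unfold find_last
  rw [PySem.List.pyRange_neg_one_cons (by omega)]
  simp only [find_last_loop]
  rw [PySem.List.pyGet?_append_length]
  by_cases h : x = v <;> simp [h]

-- find_last at end index (len pre - 1) on pre ++ rest is the LAST occurrence of v in pre (or -1)
theorem find_last_spec (v : Int) (pre : List Int) : ∀ (rest : List Int),
    (find_last v (pre ++ rest) ((pre.length : Int) - 1) = -1 ∧ v ∉ pre) ∨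
    (∃ np : ℕ, np < pre.length ∧ find_last v (pre ++ rest) ((pre.length : Int) - 1) = (np : Int) ∧
      pre[np]? = some v ∧ ∀ m : ℕ, np < m → m < pre.length → pre[m]? ≠ some v) := by
  induction pre using List.reverseRecOn with
  | nil =>
    intro rest; left
    constructor
    · unfold find_last
      rw [PySem.List.pyRange_neg_one_eq_nil (by simp)]
      rfl
    · simp
  | append_singleton pre' y ih =>
    intro rest
    have hlen : ((pre' ++ [y]).length : Int) - 1 = (pre'.length : Int) := by
      simp
    have hassoc : (pre' ++ [y]) ++ rest = pre' ++ (y :: rest) := by simp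
    rw [hlen, hassoc, find_last_step pre' rest y v]
    by_cases hy : y = v
    · right
      refine ⟨pre'.length, by simp, by simp [hy], by simp [hy], ?_⟩
      intro m h1 h2
      exact absurd h2 (by simp; omega)
    · rw [if_neg hy]
      rcases ih (y :: rest) with ⟨h1, h2⟩ | ⟨np, hnp, heq, hget, hmax⟩
      · left
        refine ⟨h1, ?_⟩
        simp only [List.mem_append, List.mem_singleton]
        rintro (h | h)
        · exact h2 h
        · exact hy h.symm
      · right
        refine ⟨np, by simp; omega, heq, ?_, ?_⟩
        · rw [List.getElem?_append_left hnp]; exact hget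
        · intro m hm1 hm2
          simp at hm2
          by_cases hm : m < pre'.length
          · rw [List.getElem?_append_left hm]; exact hmax m hm1 hm
          · have : m = pre'.length := by omega
            subst this
            simpa using hy

-- positivity of a count in a dropped suffix ↔ an occurrence at an index ≥ t
theorem count_drop_pos (pre : List Int) (t : ℕ) (v : Int) :
    0 < (pre.drop t).count v ↔ ∃ np : ℕ, t ≤ np ∧ np < pre.length ∧ pre[np]? = some v := by
  rw [List.count_pos_iff]
  constructor
  · intro h
    rcases List.getElem?_of_mem h with ⟨i, hi⟩
    rw [List.getElem?_drop] at hi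
    have hlt : t + i < pre.length := by
      by_contra hge
      rw [List.getElem?_eq_none_iff.2 (by omega)] at hi
      cases hi
    exact ⟨t + i, by omega, hlt, hi⟩
  · rintro ⟨np, h1, h2, h3⟩
    have : (pre.drop t)[np - t]? = some v := by
      rw [List.getElem?_drop]
      have : t + (np - t) = np := by omega
      rw [this]; exact h3
    exact List.mem_of_getElem? this

-- B's window test equals A's find_last condition, at position i = len pre
theorem test_eq (array pre rest : List Int) (k : Int) (hk : 2 ≤ k) (v : Int)
    (harr : array = pre ++ rest) :
    (0 < ((pre.drop (pre.length - (k.toNat - 1))).count v : Int)) ↔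
      (find_last v array ((pre.length : Int) - 1) > -1 ∧
       (pre.length : Int) - find_last v array ((pre.length : Int) - 1) < k) := by
  subst harr
  have hc := count_drop_pos pre (pre.length - (k.toNat - 1)) v
  rcases find_last_spec v pre rest with ⟨h1, h2⟩ | ⟨np, hnp, heq, hget, hmax⟩
  · rw [h1]
    constructor
    · intro h
      exfalso
      have := hc.1 (by exact_mod_cast h)
      rcases this with ⟨np, _, hlt, hg⟩
      exact h2 (List.mem_of_getElem? hg)
    · intro h; omega
  · rw [heq]
    constructor
    · intro h
      have := hc.1 (by exact_mod_cast h)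
      rcases this with ⟨nq, ht, hlt, hg⟩
      have hle : nq ≤ np := by
        by_contra hgt
        exact hmax nq (by omega) hlt hg
      have hkk : 2 ≤ k.toNat := by omega
      constructor
      · omega
      · -- np ≥ nq ≥ t = pre.length - (k.toNat - 1)
        have : pre.length - (k.toNat - 1) ≤ np := by omega
        have hcast : (k.toNat : Int) = k := Int.toNat_of_nonneg (by omega)
        omega
    · rintro ⟨_, hlt⟩
      have hcast : (k.toNat : Int) = k := Int.toNat_of_nonneg (by omega)
      have : pre.length - (k.toNat - 1) ≤ np := by omega
      exact_mod_cast hc.2 ⟨np, this, hnp, hget⟩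

-- the window invariant carried through the fold: B's count equals A's count
theorem loop_eq (array : List Int) (k : Int) (hk : 2 ≤ k) :
    ∀ (rest pre : List Int) (d : PySem.Dict Int Int) (c : Int),
      array = pre ++ rest →
      (∀ v : Int, d.getD v 0 = ((pre.drop (pre.length - (k.toNat - 1))).count v : Int)) →
      ((PySem.List.enumerate rest (pre.length : Int)).foldl (stepB array k) (d, c)).2
        = (PySem.List.enumerate rest (pre.length : Int)).foldl (stepA array k) c := by
  intro rest
  induction rest with
  | nil => intro pre d c _ _; rfl
  | cons x rest' ih =>
    intro pre d c harr hinv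
    rw [PySem.List.enumerate_cons]
    simp only [List.foldl_cons]
    set t := pre.length - (k.toNat - 1) with ht
    have hkk : 2 ≤ k.toNat := by omega
    have hcast : (k.toNat : Int) = k := Int.toNat_of_nonneg (by omega)
    -- .2 of a stepB step is just the window test applied to the old dict
    have hsnd : ∀ (dd : PySem.Dict Int Int) (cc i xx : Int),
        (stepB array k (dd, cc) (i, xx)).2 = if dd.getD xx 0 > 0 then cc + 1 else cc := by
      intro dd cc i xx
      unfold stepB
      by_cases h0 : 0 ≤ i - k + 1 <;> simp [h0]
    -- the counts after this iteration agree
    have hc : (stepB array k (d, c) ((pre.length : Int), x)).2 = stepA array k c ((pre.length : Int), x) := by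
      rw [hsnd]
      simp only [stepA, hinv x]
      by_cases hcond : find_last x array ((pre.length : Int) - 1) > -1 ∧
          (pre.length : Int) - find_last x array ((pre.length : Int) - 1) < k
      · rw [if_pos ((test_eq array pre (x :: rest') k hk x harr).2 hcond), if_pos hcond]
      · rw [if_neg (fun h => hcond ((test_eq array pre (x :: rest') k hk x harr).1 h)), if_neg hcond]
    -- the new dict after this iteration
    have harr' : array = (pre ++ [x]) ++ rest' := by simpa using harr
    have hlen1 : (((pre ++ [x]).length : Int)) = (pre.length : Int) + 1 := by simp
    have hfst : (stepB array k (d, c) ((pre.length : Int), x)).1 =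
        (if 0 ≤ (pre.length : Int) - k + 1 then
          (d.insert x (d.getD x 0 + 1)).insert (PySem.List.pyGetD array ((pre.length : Int) - k + 1) 0)
            (((d.insert x (d.getD x 0 + 1)).getD (PySem.List.pyGetD array ((pre.length : Int) - k + 1) 0) 0) - 1)
        else d.insert x (d.getD x 0 + 1)) := by
      unfold stepB
      by_cases h0 : 0 ≤ (pre.length : Int) - k + 1 <;> simp [h0]
    have hinv' : ∀ v : Int, (stepB array k (d, c) ((pre.length : Int), x)).1.getD v 0 =
        (((pre ++ [x]).drop ((pre ++ [x]).length - (k.toNat - 1))).count v : Int) := by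
      intro v
      have hlen2 : (pre ++ [x]).length - (k.toNat - 1) = (pre.length + 1) - (k.toNat - 1) := by simp
      rw [hlen2, hfst]
      by_cases hj : 0 ≤ (pre.length : Int) - k + 1
      · -- eviction: the element at index t = len pre - (k-1) leaves the window
        have htlt : t < pre.length := by omega
        have hjt : (pre.length : Int) - k + 1 = (t : Int) := by omega
        have hget : PySem.List.pyGetD array ((pre.length : Int) - k + 1) 0 = pre[t] := by
          rw [hjt, PySem.List.pyGetD_natCast, harr]
          rw [List.getD_eq_getElem?_getD, List.getElem?_append_left htlt,
            List.getElem?_eq_getElem htlt]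
          rfl
        have hsplit : pre.drop t = pre[t] :: pre.drop (t + 1) := List.drop_eq_getElem_cons htlt
        have hdrop1 : (pre ++ [x]).drop (pre.length + 1 - (k.toNat - 1)) = pre.drop (t + 1) ++ [x] := by
          have h1 : pre.length + 1 - (k.toNat - 1) = t + 1 := by omega
          rw [h1, List.drop_append_of_le_length (by omega)]
        have hcnt : ∀ u : Int, ((pre.drop t).count u : Int)
            = (if u = pre[t] then 1 else 0) + ((pre.drop (t + 1)).count u : Int) := by
          intro u
          rw [hsplit]
          simp only [List.count_cons, beq_iff_eq]
          push_cast
          split_ifs <;> omega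
        have hx : ∀ u : Int, ((pre.drop (t + 1) ++ [x]).count u : Int)
            = ((pre.drop (t + 1)).count u : Int) + (if u = x then 1 else 0) := by
          intro u
          simp only [List.count_append, List.count_cons, List.count_nil, beq_iff_eq]
          push_cast
          split_ifs <;> omega
        rw [if_pos hj, hget, hdrop1]
        rw [PySem.Dict.getD_insert, PySem.Dict.getD_insert, PySem.Dict.getD_insert]
        rw [hx v]
        by_cases hvp : v = pre[t]
        · rw [if_pos hvp]
          by_cases hpx : pre[t] = x
          · rw [if_pos hpx, if_pos (hvp.trans hpx), hinv x, hcnt x]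
            rw [if_pos hpx.symm, hvp, hpx]
            ring
          · rw [if_neg hpx, if_neg (fun h => hpx (hvp ▸ h)), hinv pre[t], hcnt pre[t]]
            rw [if_pos rfl, hvp]
            ring
        · rw [if_neg hvp]
          by_cases hvx : v = x
          · rw [if_pos hvx, hinv x, hcnt x, if_neg (fun h => hvp (hvx.trans h)), if_pos hvx, hvx]
            ring
          · rw [if_neg hvx, hinv v, hcnt v, if_neg hvp, if_neg hvx]
            ring
      · -- no eviction: the window is still the whole prefix
        have ht0 : t = 0 := by omega
        have ht1 : pre.length + 1 - (k.toNat - 1) = 0 := by omega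
        rw [if_neg hj, ht1, List.drop_zero]
        rw [PySem.Dict.getD_insert]
        have hcnt0 : ∀ u : Int, d.getD u 0 = ((pre.count u : Int)) := by
          intro u
          rw [hinv u, ht0, List.drop_zero]
        by_cases hvx : v = x
        · subst hvx
          rw [if_pos rfl, hcnt0 v]
          simp [List.count_append]
        · rw [if_neg hvx, hcnt0 v]
          simp [List.count_append, List.count_cons]
          exact fun h => hvx h.symm
    have := ih (pre ++ [x]) (stepB array k (d, c) ((pre.length : Int), x)).1
      (stepA array k c ((pre.length : Int), x)) harr' hinv'
    rw [hlen1] at this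
    rw [← this, ← hc]

-- A returns 0 when len(valores_referencia) < 2: the condition i - p < k never holds
theorem foldA_zero (array : List Int) (k : Int) (hk : k < 2) :
    ∀ (rest : List Int) (s : Int) (c : Int), 0 ≤ s →
      (PySem.List.enumerate rest s).foldl (stepA array k) c = c := by
  intro rest
  induction rest with
  | nil => intro s c _; rfl
  | cons x rest' ih =>
    intro s c hs
    rw [PySem.List.enumerate_cons]
    simp only [List.foldl_cons]
    have hstep : stepA array k c (s, x) = c := by
      unfold stepA
      dsimp only
      rcases find_last_le x array (s - 1) with h | ⟨h1, h2⟩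
      · simp only [h]; norm_num
      · rw [if_neg]; rintro ⟨_, hlt⟩; omega
    rw [hstep]
    exact ih (s + 1) c (by omega)

-- ===== VERDICT (by name: the statement is the Claim_ definition above) =====
theorem calcular_qtd_erros_distribuicao_spec : Claim_equal_calcular_qtd_erros_distribuicao := by
  intro array valores_referencia _
  unfold Spec_calcular_qtd_erros_distribuicao
  unfold calcular_qtd_erros_distribuicao calcular_qtd_erros_distribuicao_alt
  by_cases hk : (valores_referencia.length : Int) < 2
  · rw [if_pos hk]
    exact foldA_zero array _ hk array 0 0 le_rfl
  · rw [if_neg hk]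
    have hk' : 2 ≤ (valores_referencia.length : Int) := by omega
    have base : ∀ v : Int, (PySem.Dict.empty : PySem.Dict Int Int).getD v 0 =
        ((([] : List Int).drop (([] : List Int).length - ((valores_referencia.length : Int).toNat - 1))).count v : Int) := by
      intro v; simp [PySem.Dict.getD_empty]
    have := loop_eq array (valores_referencia.length : Int) hk' array [] PySem.Dict.empty 0 rfl base
    simpa using this.symm
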